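-- pv_equiv track=rewrite | github.com/marziamarra-ship-it/ORDINANZE | app.py | base_street_name
-- ===== SOURCE A (Python) =====
-- def base_street_name(addr: str) -> str:
--     """
--     Basi di confronto per la coerenza: solo 'toponimo + primo/i nomi'.
--     Ignora preposizioni: al/allo/alla/alle/ai/agli/all.
--     """
--     if not addr:
--         return ""
--     tokens = addr.split()
--     stop_tokens = {"nel", "nella", "della", "del", "dei", "degli", "delle", "tronco", "tratto", "intersezione"}
--     skip_tokens = {"al", "allo", "alla", "alle", "ai", "agli", "all"}
--     base = []
--     for w in tokens:
--         wl = w.lower()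
--         if wl in skip_tokens:
--             continue
--         if wl in stop_tokens:
--             break
--         base.append(wl)
--         if len(base) >= 4:  # bastano 3-4 parole per identificare la via
--             break
--     return " ".join(base).strip()
-- ===== SOURCE B (Python) =====
-- STOP = {"nel", "nella", "della", "del", "dei", "degli", "delle", "tronco", "tratto", "intersezione"}
-- SKIP = {"al", "allo", "alla", "alle", "ai", "agli", "all"}
--
-- def _go(ws, k):
--     """Recursive descent with a countdown budget k: skip-prepositions are
--     consumed up front, a stop token (or an exhausted budget) ends the
--     recursion, and the result string is assembled on the way back up."""
--     while ws and ws[0].lower() in SKIP: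
--         ws = ws[1:]
--     if not ws or k == 0:
--         return ""
--     w = ws[0].lower()
--     if w in STOP:
--         return ""
--     rest = _go(ws[1:], k - 1)
--     return w if not rest else w + " " + rest
--
-- def base_street_name(addr: str) -> str:
--     return _go(addr.split(), 4)
-- ===== Notes on version B (the rewrite author's own statement) =====
-- stated objective: alternative
-- what changed: Replaces A's iterative accumulate-into-a-list loop (break/continue, a length>=4 check after each append, then join and strip) by a recursive descent with a countdown budget that strips skip-prepositions up front and assembles the result string directly on the way back up out of the recursion, inserting separators only between kept words; no accumulator list, no join, no slice, no strip.
import Mathlib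
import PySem

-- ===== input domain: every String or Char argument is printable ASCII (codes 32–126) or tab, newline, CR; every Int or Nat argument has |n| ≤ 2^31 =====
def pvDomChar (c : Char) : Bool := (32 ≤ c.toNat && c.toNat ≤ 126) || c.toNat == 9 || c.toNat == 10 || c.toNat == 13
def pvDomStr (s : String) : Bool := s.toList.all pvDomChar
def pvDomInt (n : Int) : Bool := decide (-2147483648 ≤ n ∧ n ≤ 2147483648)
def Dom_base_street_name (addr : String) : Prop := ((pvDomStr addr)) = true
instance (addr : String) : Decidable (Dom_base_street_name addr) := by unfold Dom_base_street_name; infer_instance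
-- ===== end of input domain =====

-- B replaces A's accumulate-join-strip loop by a recursive descent with a countdown budget that
-- builds the result string directly (alternative decomposition; same cost).


-- ===== PORT A =====
def bsnStop : List String := ["nel", "nella", "della", "del", "dei", "degli", "delle", "tronco", "tratto", "intersezione"]
def bsnSkip : List String := ["al", "allo", "alla", "alle", "ai", "agli", "all"]

-- A's for-loop over tokens with accumulator `base`, continue/break as in the Python
def bsnLoopA : List String → List String → List String
  | [], base => base
  | w :: rest, base =>
    let wl := PySem.Str.lower w
    if wl ∈ bsnSkip then bsnLoopA rest base
    else if wl ∈ bsnStop then base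
    else
      let base' := base ++ [wl]
      if 4 ≤ base'.length then base' else bsnLoopA rest base'

def base_street_name (addr : String) : String :=
  if addr = "" then ""
  else
    let tokens := PySem.Str.split₀ addr
    PySem.Str.strip (PySem.Str.join " " (bsnLoopA tokens []))

-- ===== PORT B =====
-- Source B's `while ws and ws[0].lower() in SKIP: ws = ws[1:]`
def bsnSkipRun : List String → List String
  | [] => []
  | w :: rest => if PySem.Str.lower w ∈ bsnSkip then bsnSkipRun rest else w :: rest

-- Source B's `_go`: recursive descent with countdown budget k
def bsnGo (ws : List String) (k : Nat) : String :=
  match bsnSkipRun ws, k with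
  | [], _ => ""
  | _ :: _, 0 => ""
  | w :: rest, k' + 1 =>
    let wl := PySem.Str.lower w
    if wl ∈ bsnStop then ""
    else
      let r := bsnGo rest k'
      if r = "" then wl else wl ++ " " ++ r
termination_by k

def base_street_name_alt (addr : String) : String :=
  bsnGo (PySem.Str.split₀ addr) 4

-- ===== PRECONDITION & SPEC =====
def Spec_base_street_name (addr : String) (out : String) : Prop := out = base_street_name_alt addr
instance (addr : String) (out : String) : Decidable (Spec_base_street_name addr out) := by unfold Spec_base_street_name; infer_instance

-- ===== CLAIM (what is proved, stated in full; the proofs are below) =====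
def Claim_equal_base_street_name : Prop := ∀ (addr : String), Dom_base_street_name addr → Spec_base_street_name addr (base_street_name addr)

-- ===== LEMMAS AND PROOFS =====

-- the words A keeps, before the cap of 4: lowercased, cut at the first stop token, skip tokens removed
def bsnKept (ts : List String) : List String :=
  ((ts.map PySem.Str.lower).takeWhile (fun w => decide (w ∉ bsnStop))).filter (fun w => decide (w ∉ bsnSkip))

theorem bsn_disjoint (s : String) (h : s ∈ bsnSkip) : s ∉ bsnStop := by
  fin_cases h <;> decide

-- A's loop computes the first (4 - |base|) kept words appended to base
theorem bsnLoopA_eq (ts : List String) (base : List String) (h : base.length < 4) :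
    bsnLoopA ts base = base ++ (bsnKept ts).take (4 - base.length) := by
  induction ts generalizing base with
  | nil => simp [bsnLoopA, bsnKept]
  | cons w rest ih =>
    simp only [bsnLoopA, bsnKept, List.map_cons]
    by_cases hsk : PySem.Str.lower w ∈ bsnSkip
    · have hst : PySem.Str.lower w ∉ bsnStop := bsn_disjoint _ hsk
      rw [List.takeWhile_cons_of_pos (by simpa using hst)]
      rw [List.filter_cons_of_neg (by simpa using hsk)]
      simpa [bsnKept, hsk] using ih base h
    · by_cases hst : PySem.Str.lower w ∈ bsnStop
      · rw [List.takeWhile_cons_of_neg (by simpa using hst)]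
        simp [hsk, hst]
      · rw [List.takeWhile_cons_of_pos (by simpa using hst)]
        rw [List.filter_cons_of_pos (by simpa using hsk)]
        have htake : ∀ (l : List String),
            (PySem.Str.lower w :: l).take (4 - base.length) =
              PySem.Str.lower w :: l.take (4 - (base.length + 1)) := by
          intro l
          have h1 : 4 - base.length = (4 - (base.length + 1)) + 1 := by omega
          rw [h1, List.take_succ_cons]
        by_cases hfull : 4 ≤ (base ++ [PySem.Str.lower w]).length
        · have hb3 : base.length = 3 := by simp at hfull; omega
          simp only [hsk, hst, if_pos hfull, if_false]
          rw [htake]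
          simp [hb3]
        · have hlt : (base ++ [PySem.Str.lower w]).length < 4 := by omega
          simp only [hsk, hst, if_false, if_neg hfull]
          rw [ih (base ++ [PySem.Str.lower w]) hlt, htake]
          simpa [bsnKept] using List.append_assoc base [PySem.Str.lower w] _

-- ---------- facts about bsnSkipRun ----------
theorem bsnSkipRun_subset (ts : List String) (t : String) (h : t ∈ bsnSkipRun ts) : t ∈ ts := by
  induction ts with
  | nil => simpa [bsnSkipRun] using h
  | cons w rest ih =>
    simp only [bsnSkipRun] at h
    split_ifs at h with hw
    · exact List.mem_cons_of_mem _ (ih h)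
    · exact h

theorem bsnSkipRun_head_not_skip (ts : List String) (w : String) (rest : List String)
    (h : bsnSkipRun ts = w :: rest) : PySem.Str.lower w ∉ bsnSkip := by
  induction ts with
  | nil => simp [bsnSkipRun] at h
  | cons u tl ih =>
    simp only [bsnSkipRun] at h
    split_ifs at h with hu
    · exact ih h
    · injection h with h1 h2
      exact h1 ▸ hu

theorem bsnKept_skipRun (ts : List String) : bsnKept ts = bsnKept (bsnSkipRun ts) := by
  induction ts with
  | nil => rfl
  | cons w rest ih =>
    simp only [bsnSkipRun]
    split_ifs with hw
    · have hst : PySem.Str.lower w ∉ bsnStop := bsn_disjoint _ hw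
      rw [← ih]
      simp only [bsnKept, List.map_cons]
      rw [List.takeWhile_cons_of_pos (by simpa using hst),
          List.filter_cons_of_neg (by simpa using hw)]
    · rfl

-- ---------- goodness of split() tokens ----------
def bsnGood (u : List Char) : Prop := u ≠ [] ∧ ∀ c ∈ u, PySem.Chars.isspace c = false

theorem bsn_split₀_go_good (s cur : List Char) (acc : List (List Char))
    (hcur : ∀ c ∈ cur, PySem.Chars.isspace c = false)
    (hacc : ∀ t ∈ acc, bsnGood t) :
    ∀ t ∈ PySem.Chars.split₀.go s cur acc, bsnGood t := by
  induction s generalizing cur acc with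
  | nil =>
    intro t ht
    unfold PySem.Chars.split₀.go at ht
    split_ifs at ht with hc
    · exact hacc t (List.mem_reverse.mp ht)
    · rw [List.mem_reverse, List.mem_cons] at ht
      rcases ht with rfl | ht
      · refine ⟨by simpa [List.isEmpty_iff] using hc, ?_⟩
        intro c hc'
        exact hcur c (List.mem_reverse.mp hc')
      · exact hacc t ht
  | cons c rest ih =>
    intro t ht
    unfold PySem.Chars.split₀.go at ht
    split_ifs at ht with h1 h2
    · exact ih [] acc (by simp) hacc t ht
    · refine ih [] (cur.reverse :: acc) (by simp) ?_ t ht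
      intro u hu
      rw [List.mem_cons] at hu
      rcases hu with rfl | hu
      · refine ⟨by simpa [List.isEmpty_iff] using h2, ?_⟩
        intro d hd
        exact hcur d (List.mem_reverse.mp hd)
      · exact hacc u hu
    · refine ih (c :: cur) acc ?_ hacc t ht
      intro d hd
      rw [List.mem_cons] at hd
      rcases hd with rfl | hd
      · simpa using h1
      · exact hcur d hd

theorem bsn_split₀_good (addr : String) (t : String) (h : t ∈ PySem.Str.split₀ addr) :
    bsnGood t.toList := by
  simp only [PySem.Str.split₀, List.mem_map] at h
  obtain ⟨u, hu, rfl⟩ := h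
  rw [String.toList_ofList]
  exact bsn_split₀_go_good addr.toList [] [] (by simp) (by simp) u hu

theorem bsn_isspace_lowerChar (c : Char) :
    PySem.Chars.isspace (PySem.Chars.lowerChar c) = PySem.Chars.isspace c := by
  unfold PySem.Chars.lowerChar PySem.Chars.isupper
  split_ifs with h
  · have h1 : 65 ≤ c.toNat ∧ c.toNat ≤ 90 := by
      simp only [decide_eq_true_eq, Bool.and_eq_true] at h
      obtain ⟨ha, hb⟩ := h
      rw [Char.le_def] at ha hb
      exact ⟨ha, hb⟩
    have hv : (c.toNat + 32).isValidChar := by left; omega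
    have ht : (Char.ofNat (c.toNat + 32)).toNat = c.toNat + 32 := by
      rw [Char.toNat_ofNat, if_pos hv]
    unfold PySem.Chars.isspace
    have l : ∀ n : Nat, 65 ≤ n → n ≤ 122 →
      ((decide (n = 32) || decide (9 ≤ n) && decide (n ≤ 13) || decide (28 ≤ n) && decide (n ≤ 31) || decide (n = 133) ||
        decide (n = 160) || decide (n = 5760) || decide (8192 ≤ n) && decide (n ≤ 8202) || decide (n = 8232) ||
        decide (n = 8233) || decide (n = 8239) || decide (n = 8287) || decide (n = 12288)) = false) := by
      intro n h65 h122
      simp only [Bool.or_eq_false_iff, Bool.and_eq_false_iff, decide_eq_false_iff_not]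
      omega
    simp only [ht]
    rw [l (c.toNat + 32) (by omega) (by omega), l c.toNat (by omega) (by omega)]
  · rfl

theorem bsnGood_lower (t : String) (h : bsnGood t.toList) : bsnGood (PySem.Str.lower t).toList := by
  obtain ⟨hne, hsp⟩ := h
  simp only [PySem.Str.lower, String.toList_ofList, PySem.Chars.lower]
  constructor
  · simpa using hne
  · intro c hc
    rw [List.mem_map] at hc
    obtain ⟨d, hd, rfl⟩ := hc
    rw [bsn_isspace_lowerChar]
    exact hsp d hd

theorem bsnKept_good (ts : List String) (hts : ∀ t ∈ ts, bsnGood t.toList)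
    (p : String) (hp : p ∈ bsnKept ts) : bsnGood p.toList := by
  have h1 : p ∈ (ts.map PySem.Str.lower) :=
    (List.takeWhile_sublist _).subset (List.mem_of_mem_filter hp)
  rw [List.mem_map] at h1
  obtain ⟨t, ht, rfl⟩ := h1
  exact bsnGood_lower t (hts t ht)

-- ---------- join of good words is nonempty and strip-fixed ----------
theorem bsn_join_ne_nil (u : String) (us : List String) (hu : u.toList ≠ []) :
    (PySem.Str.join " " (u :: us)).toList ≠ [] := by
  rw [PySem.Str.toList_join]
  cases us with
  | nil => simpa [PySem.Chars.join_singleton] using hu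
  | cons v vs =>
    rw [List.map_cons, List.map_cons, PySem.Chars.join_cons_cons]
    intro h
    simp only [List.append_eq_nil_iff] at h
    exact hu h.1.1

theorem bsn_join_head (parts : List String) (hp : ∀ p ∈ parts, bsnGood p.toList)
    (hne : parts ≠ []) :
    ∃ c l, PySem.Chars.join [' '] (parts.map String.toList) = c :: l ∧ PySem.Chars.isspace c = false := by
  cases parts with
  | nil => exact absurd rfl hne
  | cons t ts =>
    obtain ⟨htne, htsp⟩ := hp t (by simp)
    obtain ⟨c, cs, hc⟩ := List.exists_cons_of_ne_nil htne
    cases ts with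
    | nil =>
      exact ⟨c, cs, by simp [PySem.Chars.join_singleton, hc], htsp c (by simp [hc])⟩
    | cons v vs =>
      refine ⟨c, cs ++ [' '] ++ PySem.Chars.join [' '] ((v :: vs).map String.toList), ?_, htsp c (by simp [hc])⟩
      rw [List.map_cons, List.map_cons, PySem.Chars.join_cons_cons, ← List.map_cons, hc]
      simp

theorem bsn_join_last (parts : List String) (hp : ∀ p ∈ parts, bsnGood p.toList)
    (hne : parts ≠ []) :
    ∃ c l, PySem.Chars.join [' '] (parts.map String.toList) = l ++ [c] ∧ PySem.Chars.isspace c = false := by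
  induction parts with
  | nil => exact absurd rfl hne
  | cons t ts ih =>
    cases ts with
    | nil =>
      obtain ⟨htne, htsp⟩ := hp t (by simp)
      rcases List.eq_nil_or_concat t.toList with h' | ⟨l, c, hl⟩
      · exact absurd h' htne
      · rw [List.concat_eq_append] at hl
        exact ⟨c, l, by simp [PySem.Chars.join_singleton, hl], htsp c (by simp [hl])⟩
    | cons v vs =>
      obtain ⟨c, l, hc, hcs⟩ := ih (fun p hp' => hp p (List.mem_cons_of_mem _ hp')) (by simp)
      refine ⟨c, t.toList ++ [' '] ++ l, ?_, hcs⟩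
      rw [List.map_cons, List.map_cons, PySem.Chars.join_cons_cons, ← List.map_cons, hc]
      simp

theorem bsn_strip_join (parts : List String) (hp : ∀ p ∈ parts, bsnGood p.toList) :
    PySem.Str.strip (PySem.Str.join " " parts) = PySem.Str.join " " parts := by
  by_cases hne : parts = []
  · subst hne; rfl
  · obtain ⟨c, l, hcl, hc⟩ := bsn_join_head parts hp hne
    obtain ⟨d, m, hdm, hd⟩ := bsn_join_last parts hp hne
    have hj : (PySem.Str.join " " parts).toList = PySem.Chars.join [' '] (parts.map String.toList) := by
      rw [PySem.Str.toList_join]; rfl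
    have hls : PySem.Chars.lstrip (PySem.Chars.join [' '] (parts.map String.toList)) =
        PySem.Chars.join [' '] (parts.map String.toList) := by
      unfold PySem.Chars.lstrip
      rw [hcl, List.dropWhile_cons_of_neg (by simp [hc])]
    have hrs : PySem.Chars.rstrip (PySem.Chars.join [' '] (parts.map String.toList)) =
        PySem.Chars.join [' '] (parts.map String.toList) := by
      unfold PySem.Chars.rstrip
      rw [hdm, List.reverse_append]
      simp only [List.reverse_cons, List.reverse_nil, List.nil_append, List.singleton_append]
      rw [List.dropWhile_cons_of_neg (by simp [hd])]
      simp
    have hfix : PySem.Chars.strip ((PySem.Str.join " " parts).toList) = (PySem.Str.join " " parts).toList := by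
      rw [hj]
      unfold PySem.Chars.strip
      rw [hls, hrs]
    calc PySem.Str.strip (PySem.Str.join " " parts)
        = String.ofList (PySem.Chars.strip ((PySem.Str.join " " parts).toList)) := rfl
      _ = String.ofList ((PySem.Str.join " " parts).toList) := by rw [hfix]
      _ = PySem.Str.join " " parts := String.ofList_toList

-- ---------- B's recursion computes join of the first k kept words ----------
theorem bsnGo_eq (k : Nat) (ts : List String) (hts : ∀ t ∈ ts, bsnGood t.toList) :
    bsnGo ts k = PySem.Str.join " " ((bsnKept ts).take k) := by
  induction k generalizing ts with
  | zero =>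
    have h0 : bsnGo ts 0 = "" := by
      unfold bsnGo
      cases hs : bsnSkipRun ts <;> rfl
    rw [h0, List.take_zero]
    rfl
  | succ k' ih =>
    unfold bsnGo
    cases hs : bsnSkipRun ts with
    | nil =>
      rw [bsnKept_skipRun, hs]
      rfl
    | cons w rest =>
      have hwsk : PySem.Str.lower w ∉ bsnSkip := bsnSkipRun_head_not_skip ts w rest hs
      have hrest : ∀ t ∈ rest, bsnGood t.toList := by
        intro t ht
        exact hts t (bsnSkipRun_subset ts t (by rw [hs]; exact List.mem_cons_of_mem _ ht))
      rw [bsnKept_skipRun, hs]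
      by_cases hst : PySem.Str.lower w ∈ bsnStop
      · have hk0 : bsnKept (w :: rest) = [] := by
          simp only [bsnKept, List.map_cons]
          rw [List.takeWhile_cons_of_neg (by simpa using hst)]
          rfl
        rw [hk0, List.take_nil]
        simp only [if_pos hst]
        rfl
      · have hk : bsnKept (w :: rest) = PySem.Str.lower w :: bsnKept rest := by
          simp only [bsnKept, List.map_cons]
          rw [List.takeWhile_cons_of_pos (by simpa using hst),
              List.filter_cons_of_pos (by simpa using hwsk)]
        rw [hk, List.take_succ_cons]
        simp only [if_neg hst]
        rw [ih rest hrest]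
        cases hkr : (bsnKept rest).take k' with
        | nil =>
          rw [if_pos (by rfl)]
          simp [PySem.Str.join, PySem.Chars.join_singleton]
          rfl
        | cons u us =>
          have hu : bsnGood u.toList := by
            refine bsnKept_good rest hrest u ?_
            exact List.mem_of_mem_take (by rw [hkr]; simp)
          have hjne : PySem.Str.join " " (u :: us) ≠ "" := by
            intro h
            exact bsn_join_ne_nil u us hu.1 (by rw [h]; rfl)
          rw [if_neg hjne]
          apply String.toList_inj.mp
          rw [String.toList_append, String.toList_append]
          rw [PySem.Str.toList_join, PySem.Str.toList_join]
          simp only [List.map_cons]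
          rw [PySem.Chars.join_cons_cons]

-- ===== VERDICT (by name: the statement is the Claim_ definition above) =====
theorem base_street_name_spec : Claim_equal_base_street_name := by
  intro addr _
  unfold Spec_base_street_name base_street_name base_street_name_alt
  by_cases he : addr = ""
  · subst he
    rw [if_pos rfl]
    have hsp : PySem.Str.split₀ "" = [] := rfl
    rw [hsp, bsnGo_eq 4 [] (by simp)]
    rfl
  · rw [if_neg he]
    have hts : ∀ t ∈ PySem.Str.split₀ addr, bsnGood t.toList := fun t ht => bsn_split₀_good addr t ht
    show PySem.Str.strip (PySem.Str.join " " (bsnLoopA (PySem.Str.split₀ addr) [])) = _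
    rw [bsnLoopA_eq _ [] (by simp)]
    rw [bsnGo_eq 4 _ hts]
    simp only [List.nil_append]
    exact bsn_strip_join _ (fun p hp => bsnKept_good _ hts p (List.mem_of_mem_take hp))
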